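-- pv_equiv track=rewrite | github.com/kianaghassabi/error-pattern-processing | HextoBinLib.py | burstErrorCalculatorForBit
-- ===== SOURCE A (Python) =====
-- def burstErrorCalculatorForBit(list):
--     '''
--     Shows the number of burst errors over all-error-patterns
--     e.g., [0,10,11]
--     0 error with length 0,
--     10 errors with lenght 1
--     '''
--     burstErrorData = [0 for i in range(0, 248)]
--
--     for i in range(len(list)):
--         continuousCounter = 1
--         for j in range(1, len(list[i])):
--             if(j == len(list[i]) - 1):
--                 if (list[i][j-1] + 1 == list[i][j]):
--                     continuousCounter +=1
--                     burstErrorData[continuousCounter] += 1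
--                     continuousCounter = 1
--                 else:
--                     burstErrorData[continuousCounter] += 1
--                     burstErrorData[1] += 1
--
--             else:
--                 if (list[i][j-1] + 1 == list[i][j]):
--                     continuousCounter += 1
--                 else:
--                     burstErrorData[continuousCounter] += 1
--                     continuousCounter = 1
--     return burstErrorData
-- ===== SOURCE B (Python) =====
-- def burstErrorCalculatorForBit(list):
--     '''Cut-index decomposition: collect the positions where consecutiveness
--     breaks, then tally the gap lengths between successive cuts.'''
--     burstErrorData = [0] * 248
--     for s in list:
--         if len(s) < 2:
--             continue
--         cuts = [0] + [k for k in range(1, len(s)) if s[k - 1] + 1 != s[k]] + [len(s)]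
--         for a, b in zip(cuts, cuts[1:]):
--             burstErrorData[b - a] += 1
--     return burstErrorData
-- ===== Notes on version B (the rewrite author's own statement) =====
-- stated objective: alternative
-- what changed: A's stateful single pass with a running counter and a special-cased last iteration is replaced by a cut-index decomposition: per sublist, collect the positions where consecutiveness breaks, then tally the gap lengths between successive cut boundaries.
import Mathlib
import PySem

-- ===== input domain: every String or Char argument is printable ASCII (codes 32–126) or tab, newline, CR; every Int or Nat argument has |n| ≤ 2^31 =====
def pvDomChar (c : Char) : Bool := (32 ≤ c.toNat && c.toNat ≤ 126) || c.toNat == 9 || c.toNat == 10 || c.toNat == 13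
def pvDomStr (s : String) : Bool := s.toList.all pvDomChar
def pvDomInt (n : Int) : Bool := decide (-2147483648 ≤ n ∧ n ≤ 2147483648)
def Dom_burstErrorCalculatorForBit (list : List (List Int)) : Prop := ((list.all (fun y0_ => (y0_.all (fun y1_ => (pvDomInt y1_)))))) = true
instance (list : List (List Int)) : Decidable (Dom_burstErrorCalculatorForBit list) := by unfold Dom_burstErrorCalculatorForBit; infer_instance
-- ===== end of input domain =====

-- B replaces A's stateful single pass (running counter with a special-cased last
-- iteration) by a cut-index decomposition: collect the break positions, tally gap
-- lengths between successive cuts (objective: alternative, same cost).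

-- ===== PORT A =====
-- burstErrorData[i] += 1  (total form; in range under Pre_)
def pvIncr (data : List Int) (i : Int) : List Int :=
  PySem.List.pySetD data i (PySem.List.pyGetD data i 0 + 1)

-- body of A's inner 'for j in range(1, len(list[i]))' loop; state = (burstErrorData, continuousCounter)
def pvBodyA (s : List Int) (st : List Int × Int) (j : Int) : List Int × Int :=
  let n := PySem.List.len s
  if j = n - 1 then
    if PySem.List.pyGetD s (j - 1) 0 + 1 = PySem.List.pyGetD s j 0 then
      (pvIncr st.1 (st.2 + 1), 1)
    else
      (pvIncr (pvIncr st.1 st.2) 1, st.2)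
  else
    if PySem.List.pyGetD s (j - 1) 0 + 1 = PySem.List.pyGetD s j 0 then
      (st.1, st.2 + 1)
    else
      (pvIncr st.1 st.2, 1)

def burstErrorCalculatorForBit (list : List (List Int)) : List Int :=
  let burstErrorData := (PySem.List.pyRange 0 248 1).map (fun _ => (0 : Int))
  (PySem.List.pyRange 0 (PySem.List.len list) 1).foldl
    (fun data i =>
      let s := PySem.List.pyGetD list i []
      ((PySem.List.pyRange 1 (PySem.List.len s) 1).foldl (pvBodyA s) (data, 1)).1)
    burstErrorData

-- ===== PORT B =====
-- positions k in [1, len s) where s[k-1] + 1 != s[k]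
def pvCuts (s : List Int) : List Int :=
  (PySem.List.pyRange 1 (PySem.List.len s) 1).filter
    (fun k => PySem.List.pyGetD s (k - 1) 0 + 1 != PySem.List.pyGetD s k 0)

def burstErrorCalculatorForBit_alt (list : List (List Int)) : List Int :=
  list.foldl
    (fun data s =>
      if PySem.List.len s < 2 then data
      else
        let cuts := 0 :: (pvCuts s ++ [PySem.List.len s])
        (cuts.zip cuts.tail).foldl (fun d ab => pvIncr d (ab.2 - ab.1)) data)
    (List.replicate 248 (0 : Int))

-- ===== PRECONDITION & SPEC =====
-- no sublist has 248 consecutive increasing-by-one elements (a longer run makes A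
-- record a run length ≥ 248 into the 248-slot table: IndexError)
def pvNoLongRun (s : List Int) : Bool :=
  (List.range s.length).all (fun i =>
    decide (s.length < i + 248) ||
    (List.range 247).any (fun t => s.getD (i + t) 0 + 1 != s.getD (i + t + 1) 0))

-- Pre_ excludes exactly the inputs on which the Python A raises IndexError
def Pre_burstErrorCalculatorForBit (list : List (List Int)) : Prop :=
  list.all pvNoLongRun = true
instance (list : List (List Int)) : Decidable (Pre_burstErrorCalculatorForBit list) := by
  unfold Pre_burstErrorCalculatorForBit; infer_instance

def pvWitness_burstErrorCalculatorForBit : List (List Int) := [[0, 1, 5, 6, 7], [4], []]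

def Spec_burstErrorCalculatorForBit (list : List (List Int)) (out : List Int) : Prop := out = burstErrorCalculatorForBit_alt list
instance (list : List (List Int)) (out : List Int) : Decidable (Spec_burstErrorCalculatorForBit list out) := by unfold Spec_burstErrorCalculatorForBit; infer_instance

-- ===== CLAIM (what is proved, stated in full; the proofs are below) =====
def Claim_equal_burstErrorCalculatorForBit : Prop := ∀ (list : List (List Int)), Dom_burstErrorCalculatorForBit list → Pre_burstErrorCalculatorForBit list → Spec_burstErrorCalculatorForBit list (burstErrorCalculatorForBit list)

-- ===== LEMMAS AND PROOFS =====

-- run lengths of prev :: rest, current run already cc long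
def pvRunLens : Int → List Int → Int → List Int
  | _, [], cc => [cc]
  | prev, y :: ys, cc =>
      if prev + 1 = y then pvRunLens y ys (cc + 1) else cc :: pvRunLens y ys 1

-- A's inner loop as structural recursion on the remaining elements
def pvLoopA : Int → List Int → List Int → Int → List Int
  | _, [], data, _ => data
  | prev, [y], data, cc =>
      if prev + 1 = y then pvIncr data (cc + 1) else pvIncr (pvIncr data cc) 1
  | prev, y :: z :: ys, data, cc =>
      if prev + 1 = y then pvLoopA y (z :: ys) data (cc + 1)
      else pvLoopA y (z :: ys) (pvIncr data cc) 1

-- gap lengths between successive boundaries, previous boundary p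
def pvGapsAux : Int → List Int → List Int
  | _, [] => []
  | p, c :: cs => (c - p) :: pvGapsAux c cs

theorem pvLoopA_eq_runLens (prev : Int) (rest : List Int) (h : rest ≠ []) :
    ∀ (data : List Int) (cc : Int),
      pvLoopA prev rest data cc = (pvRunLens prev rest cc).foldl pvIncr data := by
  induction rest generalizing prev with
  | nil => cases h rfl
  | cons y ys ih =>
    intro data cc
    cases ys with
    | nil => simp only [pvLoopA, pvRunLens]; split <;> rfl
    | cons z zs =>
      simp only [pvLoopA, pvRunLens]
      split
      · exact ih y (by simp) data (cc + 1)
      · simpa using ih y (by simp) (pvIncr data cc) 1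

theorem pvInnerA (s : List Int) :
    ∀ (k m : Nat), m + k = s.length → 1 ≤ m → ∀ (st : List Int × Int),
      ((PySem.List.pyRange (m : Int) (PySem.List.len s) 1).foldl (pvBodyA s) st).1
        = pvLoopA (s.getD (m - 1) 0) (s.drop m) st.1 st.2 := by
  intro k
  induction k with
  | zero =>
    intro m hmk hm st
    have hme : m = s.length := by omega
    rw [PySem.List.pyRange_one_eq_nil (by simp [hme])]
    simp [List.drop_of_length_le (le_of_eq hme.symm), pvLoopA]
  | succ k ih =>
    intro m hmk hm st
    have hmlt : m < s.length := by omega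
    rw [PySem.List.pyRange_one_cons (by simp; exact_mod_cast hmlt)]
    have hidx : ((m : Int) - 1) = ((m - 1 : Nat) : Int) := by omega
    have hdrop : s.drop m = s[m] :: s.drop (m + 1) := List.drop_eq_getElem_cons hmlt
    have hgd : s.getD m 0 = s[m] := List.getD_eq_getElem s 0 hmlt
    cases k with
    | zero =>
      -- last iteration: j = m = length - 1
      have hml : m + 1 = s.length := by omega
      have hlast : ((m : Int)) = (PySem.List.len s) - 1 := by simp; omega
      have hdrop1 : s.drop (m + 1) = [] := List.drop_of_length_le (le_of_eq hml.symm)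
      rw [List.foldl_cons, PySem.List.pyRange_one_eq_nil (by simp; omega), List.foldl_nil,
          hdrop, hdrop1]
      simp only [pvBodyA, if_pos hlast, pvLoopA, hidx, PySem.List.pyGetD_natCast]
      simp only [List.getD_eq_getElem?_getD, List.getElem?_eq_getElem hmlt, Option.getD_some]
      split <;> rfl
    | succ k' =>
      have hnl : ¬ ((m : Int)) = (PySem.List.len s) - 1 := by simp; omega
      rw [List.foldl_cons]
      have hdropne : s.drop (m + 1) ≠ [] := by
        intro h; have := List.drop_eq_nil_iff.mp h; omega
      obtain ⟨z, zs, hzz⟩ := List.exists_cons_of_ne_nil hdropne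
      rw [hdrop, hzz, pvLoopA]
      simp only [pvBodyA, if_neg hnl]
      rw [hidx]
      simp only [PySem.List.pyGetD_natCast, hgd]
      have ihm := ih (m + 1) (by omega) (by omega)
      have hpush : ((m : Int) + 1) = ((m + 1 : Nat) : Int) := by push_cast; ring
      split
      · rw [hpush, ihm ((st.1, st.2 + 1))]
        simp [hzz, List.getElem?_eq_getElem hmlt]
      · rw [hpush, ihm ((pvIncr st.1 st.2, 1))]
        simp [hzz, List.getElem?_eq_getElem hmlt]


theorem pvInnerB (s : List Int) :
    ∀ (k m : Nat) (cc : Int), m + k = s.length → 1 ≤ m →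
      pvGapsAux ((m : Int) - cc)
          (((PySem.List.pyRange (m : Int) (PySem.List.len s) 1).filter
              (fun j => PySem.List.pyGetD s (j - 1) 0 + 1 != PySem.List.pyGetD s j 0)) ++
            [PySem.List.len s])
        = pvRunLens (s.getD (m - 1) 0) (s.drop m) cc := by
  intro k
  induction k with
  | zero =>
    intro m cc hmk hm
    have hme : m = s.length := by omega
    rw [PySem.List.pyRange_one_eq_nil (by simp [hme])]
    simp [pvRunLens, pvGapsAux, hme, List.drop_of_length_le]
  | succ k ih =>
    intro m cc hmk hm
    have hmlt : m < s.length := by omega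
    have hidx : ((m : Int) - 1) = ((m - 1 : Nat) : Int) := by omega
    have hdrop : s.drop m = s[m] :: s.drop (m + 1) := List.drop_eq_getElem_cons hmlt
    have hgd : s.getD m 0 = s[m] := List.getD_eq_getElem s 0 hmlt
    have hpush : ((m : Int) + 1) = ((m + 1 : Nat) : Int) := by push_cast; ring
    rw [PySem.List.pyRange_one_cons (by simp; exact_mod_cast hmlt), List.filter_cons, hdrop]
    simp only [hidx, PySem.List.pyGetD_natCast, List.getD_eq_getElem?_getD,
      List.getElem?_eq_getElem hmlt, Option.getD_some, pvRunLens]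
    by_cases hadj : s[m-1]?.getD 0 + 1 = s[m]
    · rw [if_pos hadj]
      have : (s[m-1]?.getD 0 + 1 != s[m]) = false := by simp [hadj]
      rw [this]
      simp only [Bool.false_eq_true, if_false]
      have := ih (m + 1) (cc + 1) (by omega) (by omega)
      simp only [List.getD_eq_getElem?_getD] at this
      rw [hpush]
      have harg : ((m : Int) - cc) = (((m + 1 : Nat) : Int) - (cc + 1)) := by push_cast; ring
      rw [harg, this]
      simp [List.getElem?_eq_getElem hmlt]
    · rw [if_neg hadj]
      have : (s[m-1]?.getD 0 + 1 != s[m]) = true := by simp [hadj]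
      rw [this]
      simp only [if_true, List.cons_append, pvGapsAux]
      have := ih (m + 1) 1 (by omega) (by omega)
      simp only [List.getD_eq_getElem?_getD] at this
      have harg : ((m : Int)) = (((m + 1 : Nat) : Int) - 1) := by push_cast; ring
      rw [← harg] at this
      rw [hpush, this]
      simp [List.getElem?_eq_getElem hmlt]


theorem pvZipFold (L : List Int) : ∀ (p : Int) (data : List Int),
    (((p :: L).zip L).foldl (fun d ab => pvIncr d (ab.2 - ab.1)) data)
      = (pvGapsAux p L).foldl pvIncr data := by
  induction L with
  | nil => intro p data; rfl
  | cons c cs ih => intro p data; simpa [pvGapsAux] using ih c (pvIncr data (c - p))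


set_option maxRecDepth 8192 in
theorem pvInit : (PySem.List.pyRange 0 248 1).map (fun _ => (0 : Int)) = List.replicate 248 (0 : Int) := by
  decide

theorem pvElem (s : List Int) (data : List Int) :
    ((PySem.List.pyRange 1 (PySem.List.len s) 1).foldl (pvBodyA s) (data, 1)).1
      = (if PySem.List.len s < 2 then data
         else
           let cuts := 0 :: (pvCuts s ++ [PySem.List.len s])
           (cuts.zip cuts.tail).foldl (fun d ab => pvIncr d (ab.2 - ab.1)) data) := by
  by_cases h2 : s.length < 2
  · rw [PySem.List.pyRange_one_eq_nil (by simp; omega), List.foldl_nil,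
      if_pos (by simp; omega)]
  · rw [if_neg (by simp; omega)]
    have hone : ((1 : Nat) : Int) = (1 : Int) := by norm_num
    have hA := pvInnerA s (s.length - 1) 1 (by omega) (le_refl 1) (data, 1)
    rw [hone] at hA
    have hB := pvInnerB s (s.length - 1) 1 1 (by omega) (le_refl 1)
    rw [hone] at hB
    have hdropne : s.drop 1 ≠ [] := by
      intro h; have := List.drop_eq_nil_iff.mp h; omega
    rw [hA, pvLoopA_eq_runLens _ _ hdropne]
    show _ = ((0 :: (pvCuts s ++ [PySem.List.len s])).zip (pvCuts s ++ [PySem.List.len s])).foldl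
        (fun d ab => pvIncr d (ab.2 - ab.1)) data
    rw [pvZipFold]
    have hG : pvGapsAux 0 (pvCuts s ++ [PySem.List.len s])
        = pvRunLens (s.getD 0 0) (s.drop 1) 1 := by
      simpa [pvCuts] using hB
    rw [hG]

-- ===== VERDICT (by name: the statement is the Claim_ definition above) =====
theorem burstErrorCalculatorForBit_spec : Claim_equal_burstErrorCalculatorForBit := by
  intro list _ _
  unfold Spec_burstErrorCalculatorForBit burstErrorCalculatorForBit burstErrorCalculatorForBit_alt
  rw [pvInit,
    PySem.List.foldl_pyRange_zero_pyGetD (xs := list) (d := [])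
      (f := fun data s => ((PySem.List.pyRange 1 (PySem.List.len s) 1).foldl (pvBodyA s) (data, 1)).1)]
  apply PySem.List.foldl_congr_mem
  intro acc x _
  exact pvElem x acc
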